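-- pv_equiv track=rewrite | github.com/chenxu0602/LeetCode | 2383.minimum-hours-of-training-to-win-a-competition.py | minNumberOfHours
-- ===== SOURCE A (Python) =====
-- from typing import List
--
-- def minNumberOfHours(initialEnergy: int, initialExperience: int, energy: List[int], experience: List[int]) -> int:
--
--     en, ex = 0, 0
--     an, ax = 0, 0
--
--     for ener, expr in zip(energy, experience):
--         if ener >= en:
--             an += (ener - en + 1)
--             en += (ener - en + 1)
--
--         if expr >= ex:
--             ax += (expr - ex + 1)
--             ex += (expr - ex + 1)
--
--         en -= ener
--         ex += expr
--
--     return max(0, (an - initialEnergy)) + max(0, (ax - initialExperience))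
-- ===== SOURCE B (Python) =====
-- from typing import List
--
-- def minNumberOfHours(initialEnergy: int, initialExperience: int, energy: List[int], experience: List[int]) -> int:
--     n = min(len(energy), len(experience))
--     prefE, s = [0], 0
--     for v in energy[:n]:
--         s += v
--         prefE.append(s)
--     prefX, t = [0], 0
--     for v in experience[:n]:
--         t += v
--         prefX.append(t)
--     needE = max([0] + [q + 1 for q in prefE[1:]])
--     needX = max([0] + [e + 1 - p for e, p in zip(experience[:n], prefX)])
--     return max(0, needE - initialEnergy) + max(0, needX - initialExperience)
-- ===== Notes on version B (the rewrite author's own statement) =====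
-- stated objective: alternative
-- what changed: A's stateful simulation of remaining energy/experience with conditional top-ups is replaced by building prefix-sum tables once and taking the maximum over derived per-step requirement lists (the needed totals are prefix maxima of sum+1 resp. experience[i]+1-prefix).
import Mathlib
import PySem

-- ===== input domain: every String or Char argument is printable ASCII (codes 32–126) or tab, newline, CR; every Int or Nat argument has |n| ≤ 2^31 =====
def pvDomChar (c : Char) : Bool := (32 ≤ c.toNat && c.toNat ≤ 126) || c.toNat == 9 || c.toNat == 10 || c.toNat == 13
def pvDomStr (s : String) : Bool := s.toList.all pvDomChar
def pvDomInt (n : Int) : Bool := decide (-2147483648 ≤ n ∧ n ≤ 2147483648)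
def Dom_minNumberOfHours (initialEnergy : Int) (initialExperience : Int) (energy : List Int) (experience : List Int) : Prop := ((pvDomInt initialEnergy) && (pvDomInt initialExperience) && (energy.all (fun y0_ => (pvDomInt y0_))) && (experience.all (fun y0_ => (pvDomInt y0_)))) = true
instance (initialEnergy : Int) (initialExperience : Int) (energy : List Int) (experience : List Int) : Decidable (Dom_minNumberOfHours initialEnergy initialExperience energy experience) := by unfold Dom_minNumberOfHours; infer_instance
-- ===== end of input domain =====

-- B replaces A's stateful resource simulation with prefix-sum tables and a max over
-- derived requirement lists (objective: alternative decomposition, same O(n) cost).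

-- ===== PORT A =====
-- loop body of A: state (en, ex, an, ax), item (ener, expr)
def stepA (s : Int × Int × Int × Int) (p : Int × Int) : Int × Int × Int × Int :=
  let en := s.1; let ex := s.2.1; let an := s.2.2.1; let ax := s.2.2.2
  let ener := p.1; let expr := p.2
  let (an, en) := if ener ≥ en then (an + (ener - en + 1), en + (ener - en + 1)) else (an, en)
  let (ax, ex) := if expr ≥ ex then (ax + (expr - ex + 1), ex + (expr - ex + 1)) else (ax, ex)
  (en - ener, ex + expr, an, ax)

def minNumberOfHours (initialEnergy : Int) (initialExperience : Int) (energy : List Int) (experience : List Int) : Int :=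
  let st := (energy.zip experience).foldl stepA (0, 0, 0, 0)
  max 0 (st.2.2.1 - initialEnergy) + max 0 (st.2.2.2 - initialExperience)

-- ===== PORT B =====
-- 'prefL, s = [0], 0; for v in xs: s += v; prefL.append(s)' of Source B
def pvPrefFold (xs : List Int) : List Int :=
  (xs.foldl (fun (p : List Int × Int) v => (p.1 ++ [p.2 + v], p.2 + v)) ([0], 0)).1

def minNumberOfHours_alt (initialEnergy : Int) (initialExperience : Int) (energy : List Int) (experience : List Int) : Int :=
  let n := min energy.length experience.length
  let prefE := pvPrefFold (energy.take n)        -- energy[:n] (nonneg in-range slice = take)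
  let prefX := pvPrefFold (experience.take n)    -- experience[:n]
  -- max([0] + [...]) ported as a left fold of max over the comprehension, seeded with 0
  let needE := ((prefE.drop 1).map (fun q => q + 1)).foldl max 0
  let needX := (((experience.take n).zip prefX).map (fun p => p.1 + 1 - p.2)).foldl max 0
  max 0 (needE - initialEnergy) + max 0 (needX - initialExperience)

-- ===== PRECONDITION & SPEC =====
def Spec_minNumberOfHours (initialEnergy : Int) (initialExperience : Int) (energy : List Int) (experience : List Int) (out : Int) : Prop := out = minNumberOfHours_alt initialEnergy initialExperience energy experience
instance (initialEnergy : Int) (initialExperience : Int) (energy : List Int) (experience : List Int) (out : Int) : Decidable (Spec_minNumberOfHours initialEnergy initialExperience energy experience out) := by unfold Spec_minNumberOfHours; infer_instance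

-- ===== CLAIM (what is proved, stated in full; the proofs are below) =====
def Claim_equal_minNumberOfHours : Prop := ∀ (initialEnergy : Int) (initialExperience : Int) (energy : List Int) (experience : List Int), Dom_minNumberOfHours initialEnergy initialExperience energy experience → Spec_minNumberOfHours initialEnergy initialExperience energy experience (minNumberOfHours initialEnergy initialExperience energy experience)

-- ===== LEMMAS AND PROOFS =====

-- abstract recursions capturing the an/ax components of A's fold
def anSpec : List (Int × Int) → Int → Int → Int
  | [], _, an => an
  | p :: t, q, an => anSpec t (q + p.1) (max an (q + p.1))

def axSpec : List (Int × Int) → Int → Int → Int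
  | [], _, ax => ax
  | p :: t, r, ax => axSpec t (r - p.2) (max ax (p.2 + r + 1))

-- common reference recursions over plain lists
def goE : List Int → Int → Int → Int
  | [], _, m => m
  | e :: t, s, m => goE t (s + e) (max m (s + e + 1))

def goX : List Int → Int → Int → Int
  | [], _, m => m
  | x :: t, ts, m => goX t (ts + x) (max m (x + 1 - ts))

def prefList : List Int → Int → List Int
  | [], _ => []
  | e :: t, s => (s + e) :: prefList t (s + e)

lemma afold_an (l : List (Int × Int)) : ∀ en ex an ax : Int,
    (l.foldl stepA (en, ex, an, ax)).2.2.1 = anSpec l (an + 1 - en) an := by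
  induction l with
  | nil => intros; simp [anSpec]
  | cons p t ih =>
    intro en ex an ax
    simp only [List.foldl_cons, stepA, anSpec]
    split_ifs with h1 h2 <;> rw [ih] <;> congr 1 <;> omega

lemma afold_ax (l : List (Int × Int)) : ∀ en ex an ax : Int,
    (l.foldl stepA (en, ex, an, ax)).2.2.2 = axSpec l (ax - ex) ax := by
  induction l with
  | nil => intros; simp [axSpec]
  | cons p t ih =>
    intro en ex an ax
    simp only [List.foldl_cons, stepA, axSpec]
    split_ifs with h1 h2 <;> rw [ih] <;> congr 1 <;> omega

lemma anSpec_goE (l : List (Int × Int)) : ∀ q an : Int,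
    anSpec l q an = goE (l.map Prod.fst) (q - 1) an := by
  induction l with
  | nil => intros; simp [anSpec, goE]
  | cons p t ih =>
    intro q an
    simp only [anSpec, List.map_cons, goE]
    rw [ih]; congr 1 <;> omega

lemma axSpec_goX (l : List (Int × Int)) : ∀ r ax : Int,
    axSpec l r ax = goX (l.map Prod.snd) (-r) ax := by
  induction l with
  | nil => intros; simp [axSpec, goX]
  | cons p t ih =>
    intro r ax
    simp only [axSpec, List.map_cons, goX]
    rw [ih]; congr 1 <;> omega

lemma map_fst_zip_take (a : List Int) : ∀ b : List Int,
    (a.zip b).map Prod.fst = a.take (min a.length b.length) := by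
  induction a with
  | nil => intro b; simp
  | cons x t ih =>
    intro b
    cases b with
    | nil => simp
    | cons y u => simp [List.zip_cons_cons, Nat.succ_min_succ, ih]

lemma map_snd_zip_take (a : List Int) : ∀ b : List Int,
    (a.zip b).map Prod.snd = b.take (min a.length b.length) := by
  induction a with
  | nil => intro b; simp
  | cons x t ih =>
    intro b
    cases b with
    | nil => simp
    | cons y u => simp [List.zip_cons_cons, Nat.succ_min_succ, ih]

lemma prefFold (xs : List Int) : ∀ (acc : List Int) (s : Int),
    xs.foldl (fun (p : List Int × Int) v => (p.1 ++ [p.2 + v], p.2 + v)) (acc, s)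
      = (acc ++ prefList xs s, s + xs.sum) := by
  induction xs with
  | nil => intros; simp [prefList]
  | cons e t ih =>
    intro acc s
    simp only [List.foldl_cons, prefList, ih, List.append_assoc, List.singleton_append,
      List.sum_cons]
    rw [Prod.mk.injEq]
    exact ⟨rfl, by ring⟩

lemma pvPrefFold_eq (xs : List Int) : pvPrefFold xs = 0 :: prefList xs 0 := by
  simp [pvPrefFold, prefFold]

lemma goE_pref (xs : List Int) : ∀ s m : Int,
    ((prefList xs s).map (fun q => q + 1)).foldl max m = goE xs s m := by
  induction xs with
  | nil => intros; simp [prefList, goE]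
  | cons e t ih => intro s m; simp [prefList, goE, ih]

lemma goX_pref (xs : List Int) : ∀ t m : Int,
    ((xs.zip (t :: prefList xs t)).map (fun p => p.1 + 1 - p.2)).foldl max m = goX xs t m := by
  induction xs with
  | nil => intros; simp [goX]
  | cons x u ih =>
    intro t m
    simp only [prefList, List.zip_cons_cons, List.map_cons, List.foldl_cons, goX]
    exact ih (t + x) (max m (x + 1 - t))

-- ===== VERDICT (by name: the statement is the Claim_ definition above) =====
theorem minNumberOfHours_spec : Claim_equal_minNumberOfHours := by
  intro iE iX energy experience _
  unfold Spec_minNumberOfHours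
  show minNumberOfHours iE iX energy experience = minNumberOfHours_alt iE iX energy experience
  simp only [minNumberOfHours, minNumberOfHours_alt]
  rw [afold_an, afold_ax, anSpec_goE, axSpec_goX, map_fst_zip_take, map_snd_zip_take,
    pvPrefFold_eq, pvPrefFold_eq]
  simp only [List.drop_succ_cons, List.drop_zero, goE_pref, goX_pref]
  norm_num
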